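-- pv_equiv track=rewrite | github.com/FaizunM/arduino-emu-v1 | assembler/instruction.py | value_pusher
-- ===== SOURCE A (Python) =====
-- def value_pusher(text, character, value):
--     array = []
--
--     offset = 0
--     for idx in range(0, len(text)):
--         if text[idx] == character:
--             array.append(value[offset])
--             offset += 1
--         else:
--             array.append(text[idx])
--
--     return "".join(array)
-- ===== SOURCE B (Python) =====
-- def value_pusher(text, character, value):
--     # split-then-interleave: join segments between delimiters with successive values
--     if len(character) != 1:
--         return text
--     parts = text.split(character)
--     out = parts[0]
--     for v, p in zip(value, parts[1:]):
--         out += v + p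
--     return out
-- ===== Notes on version B (the rewrite author's own statement) =====
-- stated objective: alternative
-- what changed: Replaces the char-by-char scan with an offset counter by split(character) followed by interleaving the segments with successive value entries via zip.
import Mathlib
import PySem

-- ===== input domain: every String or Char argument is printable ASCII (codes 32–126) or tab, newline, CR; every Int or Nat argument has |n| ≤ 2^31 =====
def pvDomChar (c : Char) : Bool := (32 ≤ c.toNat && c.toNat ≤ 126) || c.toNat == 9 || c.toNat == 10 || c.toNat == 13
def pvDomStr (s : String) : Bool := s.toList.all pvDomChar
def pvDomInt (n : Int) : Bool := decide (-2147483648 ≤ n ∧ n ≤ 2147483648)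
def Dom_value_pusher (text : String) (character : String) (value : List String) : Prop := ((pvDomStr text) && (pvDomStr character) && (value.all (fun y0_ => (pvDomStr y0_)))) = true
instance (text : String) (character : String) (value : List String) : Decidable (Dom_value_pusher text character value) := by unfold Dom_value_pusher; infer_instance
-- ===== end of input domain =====

-- B replaces A's char-by-char scan with an offset counter by split-on-the-delimiter
-- followed by interleaving the segments with successive value entries (a different
-- decomposition of the same task; equivalence of return values is proved below).

-- ===== PORT A =====
-- for idx in range(len(text)): compare text[idx] (a 1-char string) with character,
-- append value[offset] or the char; ported as a foldl over text.toList carrying (array, offset).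
-- value[offset] is totalized with getD ""; Pre_ excludes the out-of-range case (IndexError).
def value_pusher (text : String) (character : String) (value : List String) : String :=
  let st := text.toList.foldl
    (fun (st : List (List Char) × Nat) c =>
      if [c] = character.toList then
        (st.1 ++ [(value.getD st.2 "").toList], st.2 + 1)
      else
        (st.1 ++ [[c]], st.2))
    ([], 0)
  String.ofList (PySem.Chars.join [] st.1)

-- ===== PORT B =====
def value_pusher_alt (text : String) (character : String) (value : List String) : String :=
  if character.toList.length ≠ 1 then text
  else
    let parts := PySem.Chars.splitOn text.toList character.toList
    let out := (List.zip value (PySem.List.slice parts (some 1) none)).foldl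
      (fun acc vp => acc ++ vp.1.toList ++ vp.2) (parts.getD 0 [])
    String.ofList out

-- ===== PRECONDITION & SPEC =====
-- Pre_ excludes exactly the inputs where A raises IndexError: more occurrences of the
-- (single-character) delimiter in text than there are entries in value.
def Pre_value_pusher (text : String) (character : String) (value : List String) : Prop :=
  text.toList.countP (fun c => [c] == character.toList) ≤ value.length

instance (text : String) (character : String) (value : List String) : Decidable (Pre_value_pusher text character value) := by unfold Pre_value_pusher; infer_instance

def pvWitness_value_pusher : String × String × List String := ("a+b+c", "+", ["X", "YZ"])

def Spec_value_pusher (text : String) (character : String) (value : List String) (out : String) : Prop := out = value_pusher_alt text character value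
instance (text : String) (character : String) (value : List String) (out : String) : Decidable (Spec_value_pusher text character value out) := by unfold Spec_value_pusher; infer_instance

-- ===== CLAIM (what is proved, stated in full; the proofs are below) =====
def Claim_equal_value_pusher : Prop := ∀ (text : String) (character : String) (value : List String), Dom_value_pusher text character value → Pre_value_pusher text character value → Spec_value_pusher text character value (value_pusher text character value)

-- ===== LEMMAS AND PROOFS =====

-- proof-side characterization of splitting on a single char:
-- splitOn cs [ch] = (splP ch cs).1 :: (splP ch cs).2
def splP (ch : Char) : List Char → List Char × List (List Char)
  | [] => ([], [])
  | c :: cs =>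
      let p := splP ch cs
      if c = ch then ([], p.1 :: p.2) else (c :: p.1, p.2)

-- A's appended pieces, with value consumed from the front
def gA (ch : Char) : List Char → List String → List (List Char)
  | [], _ => []
  | c :: cs, vs => if c = ch then (vs.headD "").toList :: gA ch cs vs.tail else [c] :: gA ch cs vs

lemma go_single (ch : Char) : ∀ (l : List Char) (fuel : Nat) (cur : List Char) (acc : List (List Char)),
    l.length ≤ fuel →
    PySem.Chars.splitOn.go [ch] fuel l cur acc
      = acc.reverse ++ (cur.reverse ++ (splP ch l).1) :: (splP ch l).2 := by
  intro l
  induction l with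
  | nil =>
      intro fuel cur acc _
      cases fuel <;> simp [PySem.Chars.splitOn.go, splP]
  | cons c rest ih =>
      intro fuel cur acc hle
      cases fuel with
      | zero => simp at hle
      | succ f =>
        have hrest : rest.length ≤ f := by simpa using hle
        by_cases h : c = ch
        · have hpre : [ch].isPrefixOf (c :: rest) = true := by
            simp [List.isPrefixOf, h]
          simp only [PySem.Chars.splitOn.go, hpre, if_true, List.length_cons,
            List.length_nil, Nat.zero_add, List.drop_succ_cons, List.drop_zero]
          rw [ih f [] (cur.reverse :: acc) hrest]
          simp [splP, h]
        · have hpre : [ch].isPrefixOf (c :: rest) = false := by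
            simp [List.isPrefixOf]
            exact fun e => absurd e.symm h
          simp only [PySem.Chars.splitOn.go, hpre, if_false, Bool.false_eq_true]
          rw [ih f (c :: cur) acc hrest]
          simp [splP, h]

lemma splitOn_single (ch : Char) (cs : List Char) :
    PySem.Chars.splitOn cs [ch] = (splP ch cs).1 :: (splP ch cs).2 := by
  have := go_single ch cs (cs.length + 1) [] [] (by omega)
  simpa [PySem.Chars.splitOn] using this

lemma A_fold_single (ch : Char) (character : String) (hch : character.toList = [ch])
    (value : List String) :
    ∀ (cs : List Char) (acc : List (List Char)) (off : Nat),
    (cs.foldl (fun (st : List (List Char) × Nat) c =>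
        if [c] = character.toList then
          (st.1 ++ [(value.getD st.2 "").toList], st.2 + 1)
        else
          (st.1 ++ [[c]], st.2)) (acc, off)).1
      = acc ++ gA ch cs (value.drop off) := by
  intro cs
  induction cs with
  | nil => intro acc off; simp [gA]
  | cons c cs ih =>
      intro acc off
      by_cases h : c = ch
      · simp only [List.foldl_cons]
        rw [if_pos (by rw [hch, h])]
        rw [ih]
        simp [gA, h, List.tail_drop]
      · have h' : ¬ ([c] = character.toList) := by
          rw [hch]; simp; exact h
        simp only [List.foldl_cons, if_neg h']
        rw [ih]
        simp [gA, h]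

lemma A_fold_nonsingle (character : String) (h1 : character.toList.length ≠ 1)
    (value : List String) :
    ∀ (cs : List Char) (acc : List (List Char)) (off : Nat),
    (cs.foldl (fun (st : List (List Char) × Nat) c =>
        if [c] = character.toList then
          (st.1 ++ [(value.getD st.2 "").toList], st.2 + 1)
        else
          (st.1 ++ [[c]], st.2)) (acc, off))
      = (acc ++ cs.map (fun c => [c]), off) := by
  intro cs
  induction cs with
  | nil => intro acc off; simp
  | cons c cs ih =>
      intro acc off
      have h' : ¬ ([c] = character.toList) := by
        intro h; apply h1; rw [← h]; rfl
      simp only [List.foldl_cons, if_neg h']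
      rw [ih]
      simp

lemma join_nil_flatten : ∀ (ps : List (List Char)), PySem.Chars.join [] ps = ps.flatten := by
  intro ps
  induction ps with
  | nil => simp [PySem.Chars.join_nil]
  | cons p ps ih =>
      cases ps with
      | nil => simp [PySem.Chars.join_singleton]
      | cons q rest => simp [PySem.Chars.join_cons_cons, ih]

lemma B_fold (l : List (String × List Char)) :
    ∀ (acc : List Char),
    l.foldl (fun acc vp => acc ++ vp.1.toList ++ vp.2) acc
      = acc ++ (l.map (fun vp => vp.1.toList ++ vp.2)).flatten := by
  induction l with
  | nil => intro acc; simp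
  | cons vp l ih => intro acc; simp [List.foldl_cons]

lemma core (ch : Char) : ∀ (cs : List Char) (vs : List String),
    cs.countP (fun c => c == ch) ≤ vs.length →
    (gA ch cs vs).flatten
      = (splP ch cs).1 ++ ((List.zip vs (splP ch cs).2).map (fun vp => vp.1.toList ++ vp.2)).flatten := by
  intro cs
  induction cs with
  | nil => intro vs _; simp [gA, splP]
  | cons c cs ih =>
      intro vs hle
      by_cases h : c = ch
      · cases vs with
        | nil => simp [h] at hle
        | cons v vt =>
            have hle' : cs.countP (fun c => c == ch) ≤ vt.length := by
              simp [h] at hle; omega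
            simp only [gA, splP, if_pos h, List.flatten_cons, List.headD, List.tail_cons,
              List.zip_cons_cons, List.map_cons]
            rw [ih vt hle']
            simp
      · have hle' : cs.countP (fun c => c == ch) ≤ vs.length := by
          simpa [List.countP_cons, h] using hle
        simp only [gA, splP, if_neg h, List.flatten_cons]
        rw [ih vs hle']
        simp

-- ===== VERDICT (by name: the statement is the Claim_ definition above) =====
theorem value_pusher_spec : Claim_equal_value_pusher := by
  intro text character value _ hpre
  unfold Spec_value_pusher value_pusher value_pusher_alt
  by_cases h1 : character.toList.length = 1
  · obtain ⟨ch, hch⟩ := List.length_eq_one_iff.mp h1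
    simp only [h1, ne_eq, not_true_eq_false, if_false]
    rw [A_fold_single ch character hch value text.toList [] 0]
    rw [join_nil_flatten]
    rw [hch, splitOn_single]
    rw [PySem.List.slice_from _ (by norm_num)]
    simp only [Int.toNat_one, List.drop_succ_cons, List.drop_zero, List.getD_cons_zero]
    rw [B_fold]
    have hc : text.toList.countP (fun c => c == ch) ≤ value.length := by
      have : text.toList.countP (fun c => [c] == character.toList)
           = text.toList.countP (fun c => c == ch) := by
        apply List.countP_congr; intro c _; simp [hch]
      unfold Pre_value_pusher at hpre
      rw [this] at hpre; exact hpre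
    rw [List.nil_append, core ch text.toList value hc]
  · simp only [ne_eq, h1, not_false_eq_true, if_true]
    rw [A_fold_nonsingle character h1 value text.toList [] 0]
    simp only [List.nil_append]
    rw [PySem.Chars.join_nil_singletons]
    simp
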